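-- pv_equiv track=rewrite | github.com/merchantdanish/mcp-aget-ai | src/mcp_agent/eval/agent_trace_analysis.py | extract_component_type
-- ===== SOURCE A (Python) =====
-- from typing import Dict, List, Any, Optional, Set, Tuple
--
-- def extract_component_type(span_name: str) -> Optional[str]:
--     """
--     Extract the component type from a span name.
--
--     Args:
--         span_name: Name of the span
--
--     Returns:
--         Component type or None if not identifiable
--     """
--     # Define component type prefixes to look for
--     component_prefixes = {
--         'agent': 'agent',
--         'mcp_aggregator': 'mcp_aggregator',
--         'llm': 'llm',
--         'openai': 'llm_openai',
--         'anthropic': 'llm_anthropic',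
--         'llm_openai': 'llm_openai',
--         'llm_anthropic': 'llm_anthropic'
--     }
--
--     for prefix, component_type in component_prefixes.items():
--         if span_name.startswith(prefix + '.') or span_name == prefix:
--             return component_type
--
--     return None
-- ===== SOURCE B (Python) =====
-- from typing import Optional
--
-- _COMPONENT_TYPES = {
--     'agent': 'agent',
--     'mcp_aggregator': 'mcp_aggregator',
--     'llm': 'llm',
--     'openai': 'llm_openai',
--     'anthropic': 'llm_anthropic',
--     'llm_openai': 'llm_openai',
--     'llm_anthropic': 'llm_anthropic'
-- }
--
-- def extract_component_type(span_name: str) -> Optional[str]: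
--     head = span_name.split('.', 1)[0]
--     return _COMPONENT_TYPES.get(head)
-- ===== Notes on version B (the rewrite author's own statement) =====
-- stated objective: idiomatic
-- what changed: B extracts the leading dot-separated segment once with split('.', 1)[0] and does a single dict lookup, replacing A's loop that tests startswith(prefix + '.') or equality for every prefix.
import Mathlib
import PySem

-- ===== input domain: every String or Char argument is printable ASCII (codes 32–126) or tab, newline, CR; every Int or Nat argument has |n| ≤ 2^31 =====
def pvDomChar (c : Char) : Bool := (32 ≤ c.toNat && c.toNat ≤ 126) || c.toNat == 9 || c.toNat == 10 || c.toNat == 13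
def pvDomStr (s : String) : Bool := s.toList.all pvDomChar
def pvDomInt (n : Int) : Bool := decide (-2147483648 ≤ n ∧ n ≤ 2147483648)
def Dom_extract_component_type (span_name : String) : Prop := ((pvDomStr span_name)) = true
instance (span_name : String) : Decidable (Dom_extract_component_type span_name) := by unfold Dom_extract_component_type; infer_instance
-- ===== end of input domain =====

-- B replaces A's scan over all prefixes (startswith each 'prefix.' or equality) by one
-- split('.', 1)[0] head extraction plus a single dict lookup (objective: idiomatic).

-- ===== PORT A =====
-- the component_prefixes dict of A, as its insertion-ordered item list
def aPrefixes : List (String × String) :=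
  [("agent", "agent"), ("mcp_aggregator", "mcp_aggregator"), ("llm", "llm"),
   ("openai", "llm_openai"), ("anthropic", "llm_anthropic"),
   ("llm_openai", "llm_openai"), ("llm_anthropic", "llm_anthropic")]

-- A's for-loop over the dict items, first match returns
def aLoop (items : List (String × String)) (span_name : String) : Option String :=
  match items with
  | [] => none
  | (prefix_, component_type) :: rest =>
      if PySem.Str.startswith span_name (prefix_ ++ ".") || span_name == prefix_ then
        some component_type
      else aLoop rest span_name

def extract_component_type (span_name : String) : Option String :=
  aLoop aPrefixes span_name

-- ===== PORT B =====
-- the _COMPONENT_TYPES dict of B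
def bMap : PySem.Dict String String :=
  PySem.Dict.ofList
    [("agent", "agent"), ("mcp_aggregator", "mcp_aggregator"), ("llm", "llm"),
     ("openai", "llm_openai"), ("anthropic", "llm_anthropic"),
     ("llm_openai", "llm_openai"), ("llm_anthropic", "llm_anthropic")]

def extract_component_type_alt (span_name : String) : Option String :=
  -- head = span_name.split('.', 1)[0]  (split with nonempty sep never returns none or [])
  let head : String := PySem.List.pyGetD ((PySem.Str.splitMax? span_name "." 1).getD []) 0 ""
  bMap.get? head

-- ===== PRECONDITION & SPEC =====
def Spec_extract_component_type (span_name : String) (out : Option String) : Prop := out = extract_component_type_alt span_name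
instance (span_name : String) (out : Option String) : Decidable (Spec_extract_component_type span_name out) := by unfold Spec_extract_component_type; infer_instance

-- ===== CLAIM (what is proved, stated in full; the proofs are below) =====
def Claim_equal_extract_component_type : Prop := ∀ (span_name : String), Dom_extract_component_type span_name → Spec_extract_component_type span_name (extract_component_type span_name)

-- ===== LEMMAS AND PROOFS =====

-- once maxsplit is exhausted, the go loop only ever appends after acc: head stays acc's head
lemma go_zero_head (fuel : Nat) (l : List Char) (a : List Char) :
    (PySem.Chars.splitOnMax.go ['.'] fuel 0 l [] [a]).head? = some a := by
  cases fuel with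
  | zero => simp [PySem.Chars.splitOnMax.go]
  | succ n => cases l <;> simp [PySem.Chars.splitOnMax.go]

-- with maxsplit 1, the first piece is cur.reverse ++ the chars before the first '.'
lemma go_one_head (fuel : Nat) (l cur : List Char) (h : l.length < fuel) :
    (PySem.Chars.splitOnMax.go ['.'] fuel 1 l cur []).head? =
      some (cur.reverse ++ l.takeWhile (· ≠ '.')) := by
  induction fuel generalizing l cur with
  | zero => omega
  | succ n ih =>
    cases l with
    | nil => simp [PySem.Chars.splitOnMax.go]
    | cons c rest =>
      by_cases hc : c = '.'
      · subst hc
        simp [PySem.Chars.splitOnMax.go, List.isPrefixOf, go_zero_head]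
      · have : ¬ ['.'].isPrefixOf (c :: rest) = true := by
          simp [List.isPrefixOf]; exact fun h => absurd h.symm hc
        simp only [PySem.Chars.splitOnMax.go]
        rw [if_neg (by simp), if_neg this]
        rw [ih rest (c :: cur) (by simpa using Nat.lt_of_succ_lt_succ h)]
        simp [List.takeWhile_cons, hc]

-- B's head is the segment of span_name before the first '.'
lemma head_eq_takeWhile (s : String) :
    PySem.List.pyGetD ((PySem.Str.splitMax? s "." 1).getD []) 0 ""
      = String.ofList (s.toList.takeWhile (· ≠ '.')) := by
  have h := go_one_head (s.length + 1) s.toList []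
    (by rw [show s.toList.length = s.length from by simp]; exact Nat.lt_succ_self _)
  simp only [List.reverse_nil, List.nil_append] at h
  cases hres : PySem.Chars.splitOnMax.go ['.'] (s.length + 1) 1 s.toList [] [] with
  | nil => rw [hres] at h; simp at h
  | cons x xs =>
    rw [hres] at h
    simp only [List.head?_cons, Option.some.injEq] at h
    subst h
    simp [PySem.Str.splitMax?, PySem.Chars.splitMax?, PySem.Chars.splitOnMax, hres,
      PySem.List.pyGetD_zero_cons]

-- A's per-prefix test equals comparing the pre-dot head with the prefix, for dot-free p
lemma cond_iff (p s : List Char) (hp : '.' ∉ p) :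
    ((p ++ ['.']).isPrefixOf s || s == p) = (s.takeWhile (· ≠ '.') == p) := by
  induction p generalizing s with
  | nil =>
    cases s with
    | nil => simp
    | cons c r =>
      by_cases hc : c = '.' <;>
        simp [List.isPrefixOf, List.takeWhile_cons, hc, eq_comm (a := '.') (b := c)]
  | cons a p' ih =>
    have ha : a ≠ '.' := fun h => hp (by simp [h])
    have hp' : '.' ∉ p' := fun h => hp (by simp [h])
    cases s with
    | nil => simp [List.isPrefixOf]
    | cons c r =>
      by_cases hca : c = a
      · subst hca
        simp [List.isPrefixOf, List.takeWhile_cons, ha, ih r hp']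
      · by_cases hc : c = '.'
        · simp [List.isPrefixOf, hc, ha, Ne.symm ha]
        · have h1 : (a == c) = false := beq_eq_false_iff_ne.mpr (Ne.symm hca)
          have h2 : (c == a) = false := beq_eq_false_iff_ne.mpr hca
          simp [List.isPrefixOf, h1, h2, List.takeWhile_cons, hc, hca]

-- one prefix's test in A, restated on B's head (for a literal dot-free prefix)
lemma str_cond (p s : String) (hp : '.' ∉ p.toList) :
    (PySem.Str.startswith s (p ++ ".") || s == p)
    = (String.ofList (s.toList.takeWhile (· ≠ '.')) == p) := by
  have hc := cond_iff p.toList s.toList hp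
  have htl : (p ++ ".").toList = p.toList ++ ['.'] := by simp
  simp only [PySem.Str.startswith_eq, htl, PySem.Chars.startswith]
  rw [show (s == p) = (s.toList == p.toList) from by
    simp [String.ext_iff]]
  rw [hc]
  simp [String.ext_iff]

-- ===== VERDICT (by name: the statement is the Claim_ definition above) =====
theorem extract_component_type_spec : Claim_equal_extract_component_type := by
  unfold Claim_equal_extract_component_type
  intro s _
  unfold Spec_extract_component_type extract_component_type extract_component_type_alt
  rw [head_eq_takeWhile]
  simp only [aPrefixes, aLoop,
    str_cond "agent" s (by decide), str_cond "mcp_aggregator" s (by decide),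
    str_cond "llm" s (by decide), str_cond "openai" s (by decide),
    str_cond "anthropic" s (by decide), str_cond "llm_openai" s (by decide),
    str_cond "llm_anthropic" s (by decide)]
  simp only [show bMap = PySem.Dict.mk
    [("agent", "agent"), ("mcp_aggregator", "mcp_aggregator"), ("llm", "llm"),
     ("openai", "llm_openai"), ("anthropic", "llm_anthropic"),
     ("llm_openai", "llm_openai"), ("llm_anthropic", "llm_anthropic")] from rfl,
    PySem.Dict.get?_mk_cons]
  simp only [BEq.comm]
  rfl
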